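-- pv_equiv track=rewrite | github.com/gaizzzzi/Learning-and-Coding-Everyday | main/1376_Time_Needed_to_Inform_All_Employees.py | numOfMinutes_bfs_2964ms
-- ===== SOURCE A (Python) =====
-- from typing import List
--
-- import queue
--
-- def numOfMinutes_bfs_2964ms(n: int, headID: int, manager: List[int], informTime: List[int]) -> int:
--     emp_map = {}
--     for subor, manager in enumerate(manager):
--         emp_map[manager] = emp_map.get(manager, []) + [subor]
--
--     ans = 0
--     q = queue.Queue()
--     q.put((-1, 0))
--     people = 0
--     while not q.empty():
--         emp, time = q.get()
--         if not emp in emp_map: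
--             continue
--         for sub in emp_map[emp]:
--             people += 1
--             q.put((sub, informTime[sub] + time))
--             if ans < informTime[sub] + time:
--                 ans = informTime[sub] + time
--     return ans
-- ===== SOURCE B (Python) =====
-- def numOfMinutes_bfs_2964ms(n, headID, manager, informTime):
--     # Memoized upward walks instead of a BFS from the root: each employee's
--     # total time is the sum of informTime along its manager chain up to the
--     # virtual root -1 (that is what A computes); walk each chain up once,
--     # back-filling a memo, so every node is resolved exactly once.
--     # Nodes whose chain leaves the index range, or cycles, never reach -1
--     # and contribute nothing (they are unreachable in A's BFS).
--     L = len(manager)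
--     total = {-1: 0}            # node -> summed time up to -1, or None if unreachable
--     ans = 0
--     for i in range(L):
--         path = []
--         seen = set()
--         j = i
--         while j not in total and 0 <= j < L and j not in seen:
--             seen.add(j)
--             path.append(j)
--             j = manager[j]
--         t = total.get(j)       # None when the chain left the range or cycled
--         for k in reversed(path):
--             if t is not None:
--                 t += informTime[k]
--                 if t > ans:
--                     ans = t
--             total[k] = t
--     return ans
-- ===== Notes on version B (the rewrite author's own statement) =====
-- stated objective: alternative
-- what changed: B abandons A's root-to-leaves BFS (children map + queue.Queue) and instead resolves each employee by walking its manager chain UPWARD to the virtual root -1, memoizing the summed time per node (path compression) so each node is resolved exactly once.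
-- outside the precondition, e.g. on numOfMinutes_bfs_2964ms(2, 0, [-1, 5], [0]): A returns 0, B returns 0
import Mathlib
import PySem

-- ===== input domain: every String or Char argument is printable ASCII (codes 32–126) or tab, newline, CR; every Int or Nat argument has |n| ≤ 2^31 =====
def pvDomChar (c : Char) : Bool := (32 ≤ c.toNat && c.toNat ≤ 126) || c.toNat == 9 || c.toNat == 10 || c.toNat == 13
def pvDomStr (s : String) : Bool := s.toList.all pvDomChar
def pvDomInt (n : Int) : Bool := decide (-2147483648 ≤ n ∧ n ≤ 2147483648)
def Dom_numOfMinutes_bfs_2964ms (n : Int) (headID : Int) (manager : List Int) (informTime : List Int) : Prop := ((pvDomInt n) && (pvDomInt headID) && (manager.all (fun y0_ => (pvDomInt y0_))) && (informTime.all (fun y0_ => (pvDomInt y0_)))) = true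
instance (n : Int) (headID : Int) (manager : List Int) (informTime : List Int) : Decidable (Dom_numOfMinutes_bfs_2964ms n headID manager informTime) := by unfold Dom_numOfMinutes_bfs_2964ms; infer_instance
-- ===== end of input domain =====

-- B replaces A's root-to-leaves BFS (children map + queue.Queue) by memoized upward
-- manager-chain walks with path compression: a different traversal of the same tree.

-- ===== PORT A =====
-- emp_map[manager] = emp_map.get(manager, []) + [subor]
def pvEmpMap (manager : List Int) : PySem.Dict Int (List Int) :=
  (PySem.List.enumerate manager 0).foldl
    (fun d p => d.insert p.2 (d.getD p.2 [] ++ [p.1])) PySem.Dict.empty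

-- the while loop; state = (queue, ans, people), one fuel unit per q.get().
-- informTime[sub] is PySem.List.pyGet?; the IndexError case (none, defaulted to 0 here)
-- is excluded by Pre_.  emp_map[emp] is guarded by the contains test, so getD is exact.
def pvLoopA (informTime : List Int) (d : PySem.Dict Int (List Int)) :
    Nat → List (Int × Int) → Int → Int → Int
  | 0, _, ans, _ => ans
  | _ + 1, [], ans, _ => ans
  | f + 1, (emp, time) :: rest, ans, people =>
    if PySem.Dict.contains d emp then
      let s := (PySem.Dict.getD d emp []).foldl
        (fun (s : List (Int × Int) × Int × Int) sub =>
          let tv := (PySem.List.pyGet? informTime sub).getD 0 + time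
          (s.1 ++ [(sub, tv)], (if s.2.1 < tv then tv else s.2.1), s.2.2 + 1))
        (rest, ans, people)
      pvLoopA informTime d f s.1 s.2.1 s.2.2
    else pvLoopA informTime d f rest ans people

-- fuel manager.length + 1 is provably enough q.get()s: every employee index enters the
-- queue at most once (levels are pairwise disjoint — proved below as pvGU_nodup).
def numOfMinutes_bfs_2964ms (n : Int) (headID : Int) (manager : List Int) (informTime : List Int) : Int :=
  pvLoopA informTime (pvEmpMap manager) (manager.length + 1) [((-1 : Int), (0 : Int))] 0 0

-- ===== PORT B =====
-- the inner while loop: walk up the manager chain until the node is memoized, leaves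
-- the index range, or revisits a node of this walk; one fuel unit per step (the seen
-- set grows strictly inside [0, L), so fuel manager.length + 1 provably suffices).
-- manager[j] is read with j already checked 0 <= j < len(manager), so pyGet?/getD is exact.
def pvWalkB (mg : List Int) (total : PySem.Dict Int (Option Int)) :
    Nat → Int → List Int → PySem.Set Int → List Int × Int
  | 0, j, path, _ => (path, j)
  | f + 1, j, path, seen =>
    if !(PySem.Dict.contains total j) && (decide (0 ≤ j) && decide (j < (mg.length : Int))) && !(PySem.Set.contains seen j) then
      pvWalkB mg total f ((PySem.List.pyGet? mg j).getD 0) (path ++ [j]) (PySem.Set.add seen j)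
    else (path, j)

-- the back-fill loop body: t += informTime[k] (IndexError totalized with getD 0,
-- excluded by Pre_ exactly as on the A side), running max, memoize total[k] = t
def pvFillB (it : List Int) (st : Option Int × Int × PySem.Dict Int (Option Int)) (k : Int) :
    Option Int × Int × PySem.Dict Int (Option Int) :=
  match st.1 with
  | some v =>
    let t2 := v + (PySem.List.pyGet? it k).getD 0
    (some t2, (if t2 > st.2.1 then t2 else st.2.1), (st.2.2).insert k (some t2))
  | none => (none, st.2.1, (st.2.2).insert k none)

-- one iteration of 'for i in range(L)': walk, t = total.get(j), back-fill reversed path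
def pvStepB (mg it : List Int) (st : PySem.Dict Int (Option Int) × Int) (i : Int) :
    PySem.Dict Int (Option Int) × Int :=
  let w := pvWalkB mg st.1 (mg.length + 1) i [] PySem.Set.empty
  let t0 : Option Int := (PySem.Dict.get? st.1 w.2).getD none
  let r := (w.1.reverse).foldl (pvFillB it) (t0, st.2, st.1)
  (r.2.2, r.2.1)

def numOfMinutes_bfs_2964ms_alt (n : Int) (headID : Int) (manager : List Int) (informTime : List Int) : Int :=
  ((PySem.List.pyRange 0 (manager.length : Int) 1).foldl (pvStepB manager informTime)
    (PySem.Dict.empty.insert (-1) (some 0), 0)).2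

-- ===== PRECONDITION & SPEC =====
-- Pre_ excludes exactly the region where the traversal can reach an employee index past
-- the end of informTime, where Python A (and B) raise IndexError: it keeps inputs where
-- every employee index is in range of informTime, and inputs whose manager list never
-- names the virtual root -1 (then the traversal visits nobody and nothing is indexed).
-- It is slightly narrower than "A returns": with -1 ∈ manager and a SHORT informTime, A
-- still returns when every reachable index happens to be in range (see the cite).
-- (The equivalence proof itself holds on all inputs, since both ports totalize the
-- excluded IndexError the same way; Pre_ is what makes each port faithful to its Python.)
def Pre_numOfMinutes_bfs_2964ms (n : Int) (headID : Int) (manager : List Int) (informTime : List Int) : Prop :=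
  manager.length ≤ informTime.length ∨ (-1 : Int) ∉ manager
instance (n : Int) (headID : Int) (manager : List Int) (informTime : List Int) : Decidable (Pre_numOfMinutes_bfs_2964ms n headID manager informTime) := by unfold Pre_numOfMinutes_bfs_2964ms; infer_instance

def pvWitness_numOfMinutes_bfs_2964ms : Int × Int × List Int × List Int := (1, 0, [-1], [0])

def Spec_numOfMinutes_bfs_2964ms (n : Int) (headID : Int) (manager : List Int) (informTime : List Int) (out : Int) : Prop := out = numOfMinutes_bfs_2964ms_alt n headID manager informTime
instance (n : Int) (headID : Int) (manager : List Int) (informTime : List Int) (out : Int) : Decidable (Spec_numOfMinutes_bfs_2964ms n headID manager informTime out) := by unfold Spec_numOfMinutes_bfs_2964ms; infer_instance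

-- ===== CLAIM (what is proved, stated in full; the proofs are below) =====
def Claim_equal_numOfMinutes_bfs_2964ms : Prop := ∀ (n : Int) (headID : Int) (manager : List Int) (informTime : List Int), Dom_numOfMinutes_bfs_2964ms n headID manager informTime → Pre_numOfMinutes_bfs_2964ms n headID manager informTime → Spec_numOfMinutes_bfs_2964ms n headID manager informTime (numOfMinutes_bfs_2964ms n headID manager informTime)

-- ===== LEMMAS AND PROOFS =====

-- abstract versions of the per-node data the BFS of A traverses
def pvItv (informTime : List Int) (c : Int) : Int := (PySem.List.pyGet? informTime c).getD 0
def pvCh (d : PySem.Dict Int (List Int)) (m : Int) : List Int := PySem.Dict.getD d m []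
def pvCE (it : List Int) (d : PySem.Dict Int (List Int)) (e t : Int) : List (Int × Int) :=
  (pvCh d e).map fun c => (c, pvItv it c + t)
def pvNext (it : List Int) (d : PySem.Dict Int (List Int)) (fr : List (Int × Int)) : List (Int × Int) :=
  fr.flatMap fun p => pvCE it d p.1 p.2
def pvStepAcc (it : List Int) (d : PySem.Dict Int (List Int)) (acc : Int) (e t : Int) : Int :=
  (pvCh d e).foldl (fun a c => if a < pvItv it c + t then pvItv it c + t else a) acc
def pvAccL (it : List Int) (d : PySem.Dict Int (List Int)) (acc : Int) (fr : List (Int × Int)) : Int :=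
  fr.foldl (fun a p => pvStepAcc it d a p.1 p.2) acc
def pvRun (it : List Int) (d : PySem.Dict Int (List Int)) : Nat → List (Int × Int) → Int → Int
  | 0, _, acc => acc
  | k + 1, fr, acc => if fr = [] then acc else pvRun it d k (pvNext it d fr) (pvAccL it d acc fr)
def pvIter (it : List Int) (d : PySem.Dict Int (List Int)) (k : Nat) (fr : List (Int × Int)) : List (Int × Int) :=
  (pvNext it d)^[k] fr
def pvSizes (it : List Int) (d : PySem.Dict Int (List Int)) : Nat → List (Int × Int) → Nat
  | 0, _ => 0
  | k + 1, fr => fr.length + pvSizes it d k (pvNext it d fr)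
def pvGU (it : List Int) (d : PySem.Dict Int (List Int)) : Nat → List (Int × Int) → List Int
  | 0, _ => []
  | k + 1, fr => fr.map Prod.fst ++ pvGU it d k (pvNext it d fr)

lemma pvCh_empMap (mg : List Int) (m : Int) :
    pvCh (pvEmpMap mg) m = ((PySem.List.enumerate mg 0).filter (fun p => p.2 == m)).map Prod.fst := by
  induction mg using List.reverseRecOn with
  | nil => rfl
  | append_singleton mg x ih =>
    unfold pvCh pvEmpMap at *
    rw [PySem.List.enumerate_append]
    simp only [List.foldl_append, List.filter_append, List.map_append]
    have hsing : PySem.List.enumerate [x] (0 + (mg.length : Int)) = [((mg.length : Int), x)] := by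
      simp [PySem.List.enumerate_cons, PySem.List.enumerate_nil]
    rw [hsing]
    simp only [List.foldl_cons, List.foldl_nil, List.filter_cons, List.filter_nil]
    by_cases hm : x = m
    · subst hm
      rw [PySem.Dict.getD_insert_self, ih]
      simp
    · rw [PySem.Dict.getD_insert_of_ne _ _ _ (fun h => hm h.symm), ih]
      simp [beq_iff_eq, hm]

-- ---- characterisation of the children lists ----
lemma pvMem_ch_iff (mg : List Int) (m c : Int) :
    c ∈ pvCh (pvEmpMap mg) m ↔ ∃ k : Nat, ∃ _ : k < mg.length, c = (k : Int) ∧ mg[k] = m := by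
  rw [pvCh_empMap]
  simp only [List.mem_map, List.mem_filter, beq_iff_eq, PySem.List.mem_enumerate_iff]
  constructor
  · rintro ⟨p, ⟨⟨k, hk, rfl⟩, h2⟩, rfl⟩
    exact ⟨k, hk, by simp, by simpa using h2⟩
  · rintro ⟨k, hk, rfl, hm⟩
    exact ⟨((k : Int), mg[k]), ⟨⟨k, hk, by simp⟩, hm⟩, rfl⟩

lemma pvCh_nodup (mg : List Int) (m : Int) : (pvCh (pvEmpMap mg) m).Nodup := by
  rw [pvCh_empMap]
  have hsub : (((PySem.List.enumerate mg 0).filter (fun p => p.2 == m)).map Prod.fst).Sublist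
      ((PySem.List.enumerate mg 0).map Prod.fst) :=
    List.Sublist.map _ List.filter_sublist
  apply hsub.nodup
  have := PySem.List.map_fst_enumerate mg 0
  simp only [this]
  exact PySem.List.nodup_pyRange_one 0 _

lemma pvCh_det (mg : List Int) {m m' c : Int}
    (h : c ∈ pvCh (pvEmpMap mg) m) (h' : c ∈ pvCh (pvEmpMap mg) m') : m = m' := by
  rw [pvMem_ch_iff] at h h'
  obtain ⟨k, hk, rfl, rfl⟩ := h
  obtain ⟨k', hk', hc, rfl⟩ := h'
  have : k' = k := by exact_mod_cast hc.symm
  subst this; rfl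

lemma pvCh_bounds (mg : List Int) {m c : Int} (h : c ∈ pvCh (pvEmpMap mg) m) :
    0 ≤ c ∧ c < (mg.length : Int) := by
  rw [pvMem_ch_iff] at h
  obtain ⟨k, hk, rfl, -⟩ := h
  constructor <;> [positivity; exact_mod_cast hk]

-- ---- loop-shape lemmas: A's queue loop computes the level-by-level run pvRun ----
lemma pvLoopA_empty (it : List Int) (d : PySem.Dict Int (List Int)) (F : Nat) (acc p : Int) :
    pvLoopA it d F [] acc p = acc := by
  cases F <;> rfl

lemma pvLoopA_step (it : List Int) (mg : List Int) (f : Nat) (e t : Int)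
    (rest : List (Int × Int)) (ans p : Int) :
    ∃ p', pvLoopA it (pvEmpMap mg) (f + 1) ((e, t) :: rest) ans p
        = pvLoopA it (pvEmpMap mg) f (rest ++ pvCE it (pvEmpMap mg) e t)
            (pvStepAcc it (pvEmpMap mg) ans e t) p' := by
  by_cases hc : PySem.Dict.contains (pvEmpMap mg) e
  · refine ⟨?_, ?_⟩
    · exact ((PySem.Dict.getD (pvEmpMap mg) e []).foldl (fun a _ => a + 1) p)
    · show pvLoopA it (pvEmpMap mg) (f+1) ((e, t) :: rest) ans p = _
      simp only [pvLoopA, hc, if_pos]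
      rw [PySem.List.foldl_prod_mk
            (f := fun (q : List (Int × Int)) sub => q ++ [(sub, (PySem.List.pyGet? it sub).getD 0 + t)])
            (g := fun (r : Int × Int) sub =>
              ((if r.1 < (PySem.List.pyGet? it sub).getD 0 + t then (PySem.List.pyGet? it sub).getD 0 + t else r.1), r.2 + 1)),
          PySem.List.foldl_prod_mk
            (f := fun (a : Int) sub => if a < (PySem.List.pyGet? it sub).getD 0 + t then (PySem.List.pyGet? it sub).getD 0 + t else a)
            (g := fun (a : Int) _ => a + 1),
          PySem.List.foldl_append_singleton_eq_map]
      rfl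
  · refine ⟨p, ?_⟩
    simp only [pvLoopA, hc, if_neg, Bool.false_eq_true, not_false_iff]
    unfold pvCE pvStepAcc pvCh
    rw [PySem.Dict.getD_of_not_contains _ _ (by simpa using hc)]
    simp

lemma pvLoopA_people (it mg : List Int) :
    ∀ (f : Nat) (q : List (Int × Int)) (ans p p' : Int),
      pvLoopA it (pvEmpMap mg) f q ans p = pvLoopA it (pvEmpMap mg) f q ans p' := by
  intro f
  induction f with
  | zero => intro q ans p p'; rfl
  | succ f ih =>
    rintro (_ | ⟨⟨e, t⟩, rest⟩) ans p p'
    · rfl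
    · obtain ⟨p1, h1⟩ := pvLoopA_step it mg f e t rest ans p
      obtain ⟨p2, h2⟩ := pvLoopA_step it mg f e t rest ans p'
      rw [h1, h2, ih]

lemma pvLoopA_level (it mg : List Int) :
    ∀ (fr : List (Int × Int)) (F : Nat) (pend : List (Int × Int)) (acc p : Int),
      pvLoopA it (pvEmpMap mg) (fr.length + F) (fr ++ pend) acc p
        = pvLoopA it (pvEmpMap mg) F (pend ++ pvNext it (pvEmpMap mg) fr) (pvAccL it (pvEmpMap mg) acc fr) 0 := by
  intro fr
  induction fr with
  | nil => intro F pend acc p; simp [pvNext, pvAccL, pvLoopA_people it mg F pend acc p 0]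
  | cons hd fr ih =>
    rintro F pend acc p
    obtain ⟨e, t⟩ := hd
    have hlen : ((e, t) :: fr).length + F = fr.length + 1 + F := by simp [Nat.add_comm]
    rw [hlen]
    have : fr.length + 1 + F = (fr.length + F) + 1 := by omega
    rw [this]
    obtain ⟨p1, h1⟩ := pvLoopA_step it mg (fr.length + F) e t (fr ++ pend) acc p
    rw [show (e, t) :: fr ++ pend = (e, t) :: (fr ++ pend) from rfl, h1, List.append_assoc, ih F (pend ++ pvCE it (pvEmpMap mg) e t) (pvStepAcc it (pvEmpMap mg) acc e t) p1]
    have hnext : pvNext it (pvEmpMap mg) ((e, t) :: fr) = pvCE it (pvEmpMap mg) e t ++ pvNext it (pvEmpMap mg) fr := by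
      simp [pvNext]
    have hacc : pvAccL it (pvEmpMap mg) acc ((e, t) :: fr) = pvAccL it (pvEmpMap mg) (pvStepAcc it (pvEmpMap mg) acc e t) fr := by
      simp [pvAccL]
    rw [hnext, hacc, List.append_assoc]

lemma pvLoopA_runs (it mg : List Int) :
    ∀ (k : Nat) (fr : List (Int × Int)) (acc p : Int) (F : Nat),
      pvSizes it (pvEmpMap mg) k fr ≤ F → pvIter it (pvEmpMap mg) k fr = [] →
      pvLoopA it (pvEmpMap mg) F fr acc p = pvRun it (pvEmpMap mg) k fr acc := by
  intro k
  induction k with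
  | zero =>
    intro fr acc p F _ hit
    have : fr = [] := hit
    subst this
    exact pvLoopA_empty _ _ _ _ _
  | succ k ih =>
    intro fr acc p F hsz hit
    by_cases hfr : fr = []
    · subst hfr
      rw [pvLoopA_empty]
      simp [pvRun]
    · have hF : F = fr.length + (F - fr.length) := by
        unfold pvSizes at hsz; omega
      have hl := pvLoopA_level it mg fr (F - fr.length) [] acc p
      rw [List.append_nil, List.nil_append] at hl
      rw [hF, hl]
      rw [ih (pvNext it (pvEmpMap mg) fr) (pvAccL it (pvEmpMap mg) acc fr) 0 (F - fr.length)
            (by unfold pvSizes at hsz; omega)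
            (by
              have := hit
              unfold pvIter at this ⊢
              rwa [Function.iterate_succ_apply] at this)]
      simp [pvRun, hfr]

-- ---- finiteness: levels carry pairwise-distinct employee indices, so manager.length+1
-- ---- units of fuel (q.get()s for A, walk steps for B) are enough and the run terminates ----
def pvFr0 : List (Int × Int) := [((-1 : Int), (0 : Int))]
def pvFL (it mg : List Int) (k : Nat) : List Int :=
  (pvIter it (pvEmpMap mg) k pvFr0).map Prod.fst
def pvPar (mg : List Int) (c : Int) : Int := mg.getD c.toNat 0

lemma pvNext_map_fst (it mg : List Int) (fr : List (Int × Int)) :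
    (pvNext it (pvEmpMap mg) fr).map Prod.fst = fr.flatMap (fun p => pvCh (pvEmpMap mg) p.1) := by
  simp only [pvNext, pvCE, List.map_flatMap, List.map_map]
  apply List.flatMap_congr
  intro x _
  rw [show (Prod.fst ∘ fun c => ((c : Int), pvItv it c + x.2)) = id from funext fun c => rfl, List.map_id]

lemma pvFL_succ (it mg : List Int) (k : Nat) :
    pvFL it mg (k + 1) = (pvFL it mg k).flatMap (pvCh (pvEmpMap mg)) := by
  unfold pvFL pvIter
  rw [Function.iterate_succ_apply']
  rw [pvNext_map_fst]
  simp only [List.flatMap_map]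

lemma pvCh_par (mg : List Int) {m c : Int} (h : c ∈ pvCh (pvEmpMap mg) m) : m = pvPar mg c := by
  rw [pvMem_ch_iff] at h
  obtain ⟨k, hk, rfl, rfl⟩ := h
  simp [pvPar, List.getD_eq_getElem?_getD, List.getElem?_eq_getElem hk]

lemma pvMem_FL_succ (it mg : List Int) {k : Nat} {v : Int} (h : v ∈ pvFL it mg (k + 1)) :
    (0 ≤ v ∧ v < (mg.length : Int)) ∧ pvPar mg v ∈ pvFL it mg k := by
  rw [pvFL_succ] at h
  obtain ⟨m, hm, hv⟩ := List.mem_flatMap.mp h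
  exact ⟨pvCh_bounds mg hv, by rw [← pvCh_par mg hv]; exact hm⟩

lemma pvFL_disj (it mg : List Int) :
    ∀ (k dd : Nat) (v : Int), v ∈ pvFL it mg k → v ∈ pvFL it mg (k + (dd + 1)) → False := by
  intro k
  induction k with
  | zero =>
    intro dd v h1 h2
    have : v = -1 := by simpa [pvFL, pvIter, pvFr0] using h1
    subst this
    have := (pvMem_FL_succ it mg (k := dd) (by simpa [Nat.add_comm] using h2)).1.1
    omega
  | succ k ih =>
    intro dd v h1 h2
    have h2' : v ∈ pvFL it mg ((k + (dd + 1)) + 1) := by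
      convert h2 using 2; omega
    exact ih dd (pvPar mg v) (pvMem_FL_succ it mg h1).2 (pvMem_FL_succ it mg h2').2

lemma pvFL_nodup (it mg : List Int) : ∀ k, (pvFL it mg k).Nodup := by
  intro k
  induction k with
  | zero => simp [pvFL, pvIter, pvFr0]
  | succ k ih =>
    rw [pvFL_succ]
    rw [List.nodup_flatMap]
    refine ⟨fun m _ => pvCh_nodup mg m, ?_⟩
    have : (pvFL it mg k).Pairwise (· ≠ ·) := ih
    exact this.imp (fun {a b} hab => by
      intro c hca hcb
      exact hab (pvCh_det mg hca hcb))

lemma pvGU_snoc (it mg : List Int) :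
    ∀ (k : Nat) (fr : List (Int × Int)),
      pvGU it (pvEmpMap mg) (k + 1) fr
        = pvGU it (pvEmpMap mg) k fr ++ (pvIter it (pvEmpMap mg) k fr).map Prod.fst := by
  intro k
  induction k with
  | zero => intro fr; simp [pvGU, pvIter]
  | succ k ih =>
    intro fr
    show fr.map Prod.fst ++ pvGU it (pvEmpMap mg) (k + 1) (pvNext it (pvEmpMap mg) fr)
        = (fr.map Prod.fst ++ pvGU it (pvEmpMap mg) k (pvNext it (pvEmpMap mg) fr))
          ++ (pvIter it (pvEmpMap mg) (k + 1) fr).map Prod.fst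
    rw [ih (pvNext it (pvEmpMap mg) fr),
        show pvIter it (pvEmpMap mg) k (pvNext it (pvEmpMap mg) fr) = pvIter it (pvEmpMap mg) (k + 1) fr
          from (Function.iterate_succ_apply _ _ _).symm,
        List.append_assoc]

lemma pvMem_GU (it mg : List Int) :
    ∀ (k : Nat) (fr : List (Int × Int)) (v : Int),
      v ∈ pvGU it (pvEmpMap mg) k fr ↔ ∃ i, i < k ∧ v ∈ (pvIter it (pvEmpMap mg) i fr).map Prod.fst := by
  intro k
  induction k with
  | zero => intro fr v; simp [pvGU]
  | succ k ih =>
    intro fr v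
    rw [pvGU_snoc, List.mem_append, ih]
    constructor
    · rintro (⟨i, hi, hv⟩ | hv)
      · exact ⟨i, by omega, hv⟩
      · exact ⟨k, by omega, hv⟩
    · rintro ⟨i, hi, hv⟩
      rcases Nat.lt_or_ge i k with h | h
      · exact Or.inl ⟨i, h, hv⟩
      · have : i = k := by omega
        subst this; exact Or.inr hv

lemma pvGU_nodup (it mg : List Int) (k : Nat) : (pvGU it (pvEmpMap mg) k pvFr0).Nodup := by
  induction k with
  | zero => simp [pvGU]
  | succ k ih =>
    rw [pvGU_snoc]
    refine List.Nodup.append ih (pvFL_nodup it mg k) ?_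
    intro v hv hv'
    obtain ⟨i, hik, hvi⟩ := (pvMem_GU it mg k pvFr0 v).mp hv
    exact pvFL_disj it mg i (k - i - 1) v hvi (by
      have : i + (k - i - 1 + 1) = k := by omega
      rw [this]
      exact hv')

lemma pvSizes_eq_GU (it mg : List Int) :
    ∀ (k : Nat) (fr : List (Int × Int)),
      pvSizes it (pvEmpMap mg) k fr = (pvGU it (pvEmpMap mg) k fr).length := by
  intro k
  induction k with
  | zero => intro fr; rfl
  | succ k ih => intro fr; show fr.length + _ = (fr.map Prod.fst ++ _).length; simp [ih]

lemma pvGU_subset (it mg : List Int) (k : Nat) {v : Int} (hv : v ∈ pvGU it (pvEmpMap mg) k pvFr0) :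
    v ∈ (-1 : Int) :: PySem.List.pyRange 0 (mg.length : Int) 1 := by
  obtain ⟨i, _, hvi⟩ := (pvMem_GU it mg k pvFr0 v).mp hv
  cases i with
  | zero =>
    have : v = -1 := by simpa [pvIter, pvFr0] using hvi
    simp [this]
  | succ i =>
    have hb := (pvMem_FL_succ it mg (k := i) hvi).1
    exact List.mem_cons_of_mem _ ((PySem.List.mem_pyRange_one).mpr ⟨by omega, by omega⟩)

lemma pvSizes_le (it mg : List Int) (k : Nat) :
    pvSizes it (pvEmpMap mg) k pvFr0 ≤ mg.length + 1 := by
  rw [pvSizes_eq_GU]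
  have hsub : (pvGU it (pvEmpMap mg) k pvFr0) ⊆ (-1 : Int) :: PySem.List.pyRange 0 (mg.length : Int) 1 :=
    fun v hv => pvGU_subset it mg k hv
  have := ((pvGU_nodup it mg k).subperm hsub).length_le
  simp only [List.length_cons, PySem.List.length_pyRange_one] at this
  omega

lemma pvIter_empty_mono (it mg : List Int) (k : Nat) (fr : List (Int × Int))
    (h : pvIter it (pvEmpMap mg) k fr = []) :
    ∀ dd, pvIter it (pvEmpMap mg) (k + dd) fr = [] := by
  intro dd
  induction dd with
  | zero => exact h
  | succ dd ih =>
    unfold pvIter at ih ⊢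
    rw [show k + (dd + 1) = (k + dd) + 1 from rfl, Function.iterate_succ_apply', ih]
    simp [pvNext]

lemma pvGU_ge (it mg : List Int) :
    ∀ (k : Nat) (fr : List (Int × Int)),
      (∀ i, i < k → pvIter it (pvEmpMap mg) i fr ≠ []) → k ≤ (pvGU it (pvEmpMap mg) k fr).length := by
  intro k
  induction k with
  | zero => intro fr _; simp
  | succ k ih =>
    intro fr hne
    rw [pvGU_snoc, List.length_append]
    have h1 := ih fr (fun i hi => hne i (by omega))
    have h2 : (pvIter it (pvEmpMap mg) k fr).length ≥ 1 := by
      have := hne k (by omega)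
      cases hx : pvIter it (pvEmpMap mg) k fr with
      | nil => exact absurd hx this
      | cons a l => simp
    rw [List.length_map]
    omega

lemma pvIter_fr0_empty (it mg : List Int) :
    pvIter it (pvEmpMap mg) (mg.length + 1) pvFr0 = [] := by
  by_contra h
  have hall : ∀ i, i < mg.length + 2 → pvIter it (pvEmpMap mg) i pvFr0 ≠ [] := by
    intro i hi hemp
    exact h (by
      have := pvIter_empty_mono it mg i pvFr0 hemp (mg.length + 1 - i)
      rwa [show i + (mg.length + 1 - i) = mg.length + 1 by omega] at this)
  have := pvGU_ge it mg (mg.length + 2) pvFr0 hall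
  have h2 := pvSizes_le it mg (mg.length + 2)
  rw [pvSizes_eq_GU] at h2
  omega

-- ===================================================================
-- ---- the common description: chain totals pvDd (by exact depth) and pvT ----
-- ===================================================================

def pvDd (mg it : List Int) : Nat → Int → Option Int
  | 0, j => if j = -1 then some 0 else none
  | d + 1, j =>
    if 0 ≤ j ∧ j < (mg.length : Int) then (pvDd mg it d (pvPar mg j)).map (· + pvItv it j) else none

-- A's level d carries exactly the pairs (i, t) with pvDd d i = some t
lemma pvMem_iter (mg it : List Int) :
    ∀ (d : Nat) (i t : Int), (i, t) ∈ pvIter it (pvEmpMap mg) d pvFr0 ↔ pvDd mg it d i = some t := by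
  intro d
  induction d with
  | zero =>
    intro i t
    constructor
    · intro h
      have h2 : i = -1 ∧ t = 0 := by simpa [pvIter, pvFr0, Prod.ext_iff] using h
      simp [pvDd, h2.1, h2.2]
    · intro h
      by_cases hi : i = -1
      · subst hi
        have h2 : (0 : Int) = t := by simpa [pvDd] using h
        simp [pvIter, pvFr0, ← h2]
      · simp [pvDd, hi] at h
  | succ d ih =>
    intro i t
    have hstep : pvIter it (pvEmpMap mg) (d + 1) pvFr0
        = pvNext it (pvEmpMap mg) (pvIter it (pvEmpMap mg) d pvFr0) := by
      unfold pvIter; rw [Function.iterate_succ_apply']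
    rw [hstep]
    constructor
    · intro h
      obtain ⟨p, hp, hmem⟩ := List.mem_flatMap.mp h
      obtain ⟨c, hc, heq⟩ := List.mem_map.mp hmem
      obtain ⟨rfl, rfl⟩ : c = i ∧ pvItv it c + p.2 = t := by
        exact ⟨congrArg Prod.fst heq, congrArg Prod.snd heq⟩
      have hb := pvCh_bounds mg hc
      have hpar := pvCh_par mg hc
      have hprev : pvDd mg it d (pvPar mg c) = some p.2 := by
        rw [← hpar]
        exact (ih p.1 p.2).mp (by rw [show (p.1, p.2) = p from rfl]; exact hp)
      show pvDd mg it (d + 1) c = some (pvItv it c + p.2)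
      simp only [pvDd, if_pos hb, hprev, Option.map_some]
      rw [Int.add_comm]
    · intro h
      simp only [pvDd] at h
      split_ifs at h with hb
      obtain ⟨s, hs, hts⟩ : ∃ s, pvDd mg it d (pvPar mg i) = some s ∧ s + pvItv it i = t := by
        cases hx : pvDd mg it d (pvPar mg i) with
        | none => rw [hx] at h; simp at h
        | some s => rw [hx] at h; exact ⟨s, rfl, by simpa using h⟩
      have hmem : (pvPar mg i, s) ∈ pvIter it (pvEmpMap mg) d pvFr0 := (ih _ _).mpr hs
      have hch : i ∈ pvCh (pvEmpMap mg) (pvPar mg i) := by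
        rw [pvMem_ch_iff]
        refine ⟨i.toNat, by omega, by omega, ?_⟩
        simp [pvPar, List.getD_eq_getElem?_getD, List.getElem?_eq_getElem (show i.toNat < mg.length by omega)]
      have ht2 : t = pvItv it i + s := by omega
      subst ht2
      exact List.mem_flatMap.mpr ⟨(pvPar mg i, s), hmem, List.mem_map.mpr ⟨i, hch, rfl⟩⟩

lemma pvDd_le (mg it : List Int) {d : Nat} {i t : Int}
    (h : pvDd mg it d i = some t) : d ≤ mg.length := by
  by_contra hgt
  have hmem : (i, t) ∈ pvIter it (pvEmpMap mg) d pvFr0 := (pvMem_iter mg it d i t).mpr h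
  have : pvIter it (pvEmpMap mg) d pvFr0 = [] := by
    have := pvIter_empty_mono it mg (mg.length + 1) pvFr0 (pvIter_fr0_empty it mg) (d - (mg.length + 1))
    rwa [show mg.length + 1 + (d - (mg.length + 1)) = d by omega] at this
  rw [this] at hmem
  exact absurd hmem (by simp)

-- the (fuel-based) chain total; pvT is the true total of a node
def pvCc (mg it : List Int) : Nat → Int → Option Int
  | 0, _ => none
  | f + 1, j =>
    if j = -1 then some 0
    else if 0 ≤ j ∧ j < (mg.length : Int) then (pvCc mg it f (pvPar mg j)).map (· + pvItv it j)
    else none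

def pvT (mg it : List Int) (j : Int) : Option Int := pvCc mg it (mg.length + 1) j

lemma pvCc_iff (mg it : List Int) :
    ∀ (f : Nat) (j t : Int), pvCc mg it f j = some t ↔ ∃ d, d < f ∧ pvDd mg it d j = some t := by
  intro f
  induction f with
  | zero => intro j t; simp [pvCc]
  | succ f ih =>
    intro j t
    by_cases hj : j = -1
    · subst hj
      constructor
      · intro h
        have h2 : (0 : Int) = t := by simpa [pvCc] using h
        exact ⟨0, by omega, by simp [pvDd, ← h2]⟩
      · rintro ⟨d, hd, hD⟩
        cases d with
        | zero =>
          have h2 : (0 : Int) = t := by simpa [pvDd] using hD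
          simp [pvCc, ← h2]
        | succ d =>
          simp only [pvDd] at hD
          rw [if_neg (by omega)] at hD
          exact absurd hD (by simp)
    · by_cases hb : 0 ≤ j ∧ j < (mg.length : Int)
      · constructor
        · intro h
          simp only [pvCc, if_neg hj, if_pos hb] at h
          obtain ⟨s, hs, hts⟩ : ∃ s, pvCc mg it f (pvPar mg j) = some s ∧ s + pvItv it j = t := by
            cases hx : pvCc mg it f (pvPar mg j) with
            | none => rw [hx] at h; simp at h
            | some s => rw [hx] at h; exact ⟨s, rfl, by simpa using h⟩
          obtain ⟨d, hd, hD⟩ := (ih _ _).mp hs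
          exact ⟨d + 1, by omega, by simp only [pvDd, if_pos hb, hD, Option.map_some, hts]⟩
        · rintro ⟨d, hd, hD⟩
          cases d with
          | zero => simp [pvDd, hj] at hD
          | succ d =>
            simp only [pvDd, if_pos hb] at hD
            obtain ⟨s, hs, hts⟩ : ∃ s, pvDd mg it d (pvPar mg j) = some s ∧ s + pvItv it j = t := by
              cases hx : pvDd mg it d (pvPar mg j) with
              | none => rw [hx] at hD; simp at hD
              | some s => rw [hx] at hD; exact ⟨s, rfl, by simpa using hD⟩
            simp only [pvCc, if_neg hj, if_pos hb]
            rw [(ih _ _).mpr ⟨d, by omega, hs⟩]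
            simp [hts]
      · constructor
        · intro h; simp [pvCc, hj, hb] at h
        · rintro ⟨d, hd, hD⟩
          cases d with
          | zero => simp [pvDd, hj] at hD
          | succ d => simp [pvDd, hb] at hD

lemma pvT_iff (mg it : List Int) (j t : Int) :
    pvT mg it j = some t ↔ ∃ d, pvDd mg it d j = some t := by
  unfold pvT
  rw [pvCc_iff]
  constructor
  · rintro ⟨d, _, h⟩; exact ⟨d, h⟩
  · rintro ⟨d, h⟩; exact ⟨d, by have := pvDd_le mg it h; omega, h⟩

lemma pvT_neg_one (mg it : List Int) : pvT mg it (-1) = some 0 := by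
  simp [pvT, pvCc]

lemma pvT_out (mg it : List Int) {j : Int} (hj : j ≠ -1) (hb : ¬(0 ≤ j ∧ j < (mg.length : Int))) :
    pvT mg it j = none := by
  cases hx : pvT mg it j with
  | none => rfl
  | some t =>
    obtain ⟨d, hd⟩ := (pvT_iff mg it j t).mp hx
    cases d with
    | zero => simp [pvDd, hj] at hd
    | succ d => simp [pvDd, hb] at hd

lemma pvT_unfold (mg it : List Int) {j : Int} (hb : 0 ≤ j ∧ j < (mg.length : Int)) :
    pvT mg it j = (pvT mg it (pvPar mg j)).map (· + pvItv it j) := by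
  cases hx : pvT mg it (pvPar mg j) with
  | some s =>
    obtain ⟨d, hd⟩ := (pvT_iff mg it _ s).mp hx
    have : pvDd mg it (d + 1) j = some (s + pvItv it j) := by
      simp [pvDd, hb, hd]
    rw [(pvT_iff mg it j (s + pvItv it j)).mpr ⟨d + 1, this⟩]
    simp
  | none =>
    simp only [Option.map_none]
    cases hy : pvT mg it j with
    | none => rfl
    | some t =>
      obtain ⟨d, hd⟩ := (pvT_iff mg it j t).mp hy
      cases d with
      | zero =>
        have : j = -1 := by by_contra hc; simp [pvDd, hc] at hd
        omega
      | succ d =>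
        simp only [pvDd, if_pos hb] at hd
        obtain ⟨s, hs, -⟩ : ∃ s, pvDd mg it d (pvPar mg j) = some s ∧ True := by
          cases hz : pvDd mg it d (pvPar mg j) with
          | none => rw [hz] at hd; simp at hd
          | some s => exact ⟨s, rfl, trivial⟩
        have : pvT mg it (pvPar mg j) = some s := (pvT_iff mg it _ s).mpr ⟨d, hs⟩
        rw [this] at hx; exact absurd hx (by simp)

-- a set closed under the parent step and containing no -1 is unreachable
lemma pvDd_none_of_closed (mg it : List Int) (P : List Int)
    (hcl : ∀ k ∈ P, 0 ≤ k ∧ pvPar mg k ∈ P) :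
    ∀ (d : Nat) (k : Int), k ∈ P → pvDd mg it d k = none := by
  intro d
  induction d with
  | zero =>
    intro k hk
    have := (hcl k hk).1
    simp [pvDd, show k ≠ -1 by omega]
  | succ d ih =>
    intro k hk
    simp only [pvDd]
    split_ifs with hb
    · rw [ih (pvPar mg k) (hcl k hk).2]; rfl
    · rfl

lemma pvT_none_of_closed (mg it : List Int) (P : List Int)
    (hcl : ∀ k ∈ P, 0 ≤ k ∧ pvPar mg k ∈ P) {k : Int} (hk : k ∈ P) :
    pvT mg it k = none := by
  cases hx : pvT mg it k with
  | none => rfl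
  | some t =>
    obtain ⟨d, hd⟩ := (pvT_iff mg it k t).mp hx
    rw [pvDd_none_of_closed mg it P hcl d k hk] at hd
    exact absurd hd (by simp)

-- ===================================================================
-- ---- A's result as a fold of max over the multiset of reachable totals ----
-- ===================================================================

def pvGUP (it : List Int) (d : PySem.Dict Int (List Int)) : Nat → List (Int × Int) → List (Int × Int)
  | 0, _ => []
  | k + 1, fr => fr ++ pvGUP it d k (pvNext it d fr)

lemma pvGU_eq_map_fst (it : List Int) (d : PySem.Dict Int (List Int)) :
    ∀ (k : Nat) (fr : List (Int × Int)), pvGU it d k fr = (pvGUP it d k fr).map Prod.fst := by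
  intro k
  induction k with
  | zero => intro fr; rfl
  | succ k ih => intro fr; show _ ++ _ = _; rw [ih]; simp [pvGUP]

lemma pvMem_GUP (it : List Int) (d : PySem.Dict Int (List Int)) :
    ∀ (k : Nat) (fr : List (Int × Int)) (p : Int × Int),
      p ∈ pvGUP it d k fr ↔ ∃ a, a < k ∧ p ∈ pvIter it d a fr := by
  intro k
  induction k with
  | zero => intro fr p; simp [pvGUP]
  | succ k ih =>
    intro fr p
    show p ∈ fr ++ pvGUP it d k (pvNext it d fr) ↔ _
    rw [List.mem_append, ih]
    constructor
    · rintro (h | ⟨a, ha, h⟩)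
      · exact ⟨0, by omega, h⟩
      · exact ⟨a + 1, by omega, by rwa [pvIter, Function.iterate_succ_apply]⟩
    · rintro ⟨a, ha, h⟩
      cases a with
      | zero => exact Or.inl h
      | succ a =>
        rw [pvIter, Function.iterate_succ_apply] at h
        exact Or.inr ⟨a, by omega, h⟩

lemma pvIfMax (a t : Int) : (if t > a then t else a) = max a t := by
  split_ifs with h <;> omega

lemma pvIfMax' (a t : Int) : (if a < t then t else a) = max a t := by
  split_ifs with h <;> omega

lemma pvFoldl_flatMap {α β γ : Type} (f : α → List β) (g : γ → β → γ) :
    ∀ (l : List α) (init : γ), (l.flatMap f).foldl g init = l.foldl (fun acc x => (f x).foldl g acc) init := by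
  intro l
  induction l with
  | nil => intro init; rfl
  | cons hd tl ih => intro init; simp only [List.flatMap_cons, List.foldl_append, List.foldl_cons, ih]

lemma pvStepAcc_eq (it : List Int) (d : PySem.Dict Int (List Int)) (acc e t : Int) :
    pvStepAcc it d acc e t = ((pvCE it d e t).map Prod.snd).foldl max acc := by
  unfold pvStepAcc pvCE
  rw [List.map_map, List.foldl_map]
  apply PySem.List.foldl_congr_mem
  intro a c _
  exact pvIfMax' a _

lemma pvAccL_eq (it : List Int) (d : PySem.Dict Int (List Int)) (acc : Int) (fr : List (Int × Int)) :
    pvAccL it d acc fr = ((pvNext it d fr).map Prod.snd).foldl max acc := by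
  unfold pvAccL pvNext
  rw [List.map_flatMap, pvFoldl_flatMap]
  apply PySem.List.foldl_congr_mem
  intro a p _
  exact pvStepAcc_eq it d a p.1 p.2

lemma pvGUP_nil (it : List Int) (d : PySem.Dict Int (List Int)) :
    ∀ k, pvGUP it d k [] = [] := by
  intro k
  induction k with
  | zero => rfl
  | succ k ih => show [] ++ pvGUP it d k (pvNext it d []) = []; simp [pvNext, ih]

lemma pvRun_eq (it : List Int) (d : PySem.Dict Int (List Int)) :
    ∀ (k : Nat) (fr : List (Int × Int)) (acc : Int),
      pvRun it d k fr acc = ((pvGUP it d k (pvNext it d fr)).map Prod.snd).foldl max acc := by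
  intro k
  induction k with
  | zero => intro fr acc; rfl
  | succ k ih =>
    intro fr acc
    show (if fr = [] then acc else pvRun it d k (pvNext it d fr) (pvAccL it d acc fr)) = _
    by_cases hfr : fr = []
    · subst hfr
      rw [if_pos rfl]
      simp [pvNext, pvGUP_nil]
    · rw [if_neg hfr, ih]
      show _ = ((pvGUP it d (k+1) (pvNext it d fr)).map Prod.snd).foldl max acc
      show _ = ((pvNext it d fr ++ pvGUP it d k (pvNext it d (pvNext it d fr))).map Prod.snd).foldl max acc
      rw [List.map_append, List.foldl_append, pvAccL_eq]

-- ===================================================================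
-- ---- B's bookkeeping: option-max fold, invariant, walk and fill specs ----
-- ===================================================================

def pvOMax (a : Int) (o : Option Int) : Int :=
  match o with
  | some t => if t > a then t else a
  | none => a

lemma pvOMax_comm (a : Int) (o o' : Option Int) :
    pvOMax (pvOMax a o) o' = pvOMax (pvOMax a o') o := by
  cases o <;> cases o' <;> simp [pvOMax] <;> omega

lemma pvFoldl_pvOMax_filterMap {α : Type} (g : α → Option Int) :
    ∀ (l : List α) (acc : Int),
      l.foldl (fun a k => pvOMax a (g k)) acc = (l.filterMap g).foldl max acc := by
  intro l
  induction l with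
  | nil => intro acc; rfl
  | cons hd tl ih =>
    intro acc
    rw [List.foldl_cons, List.filterMap_cons]
    cases hx : g hd with
    | none => rw [ih]; simp [pvOMax]
    | some t => rw [ih]; simp [pvOMax, pvIfMax]

-- the reversed-path link structure: first element's parent is j, then each one's parent
-- is the element before it
def pvLinksR (mg : List Int) : List Int → Int → Prop
  | [], _ => True
  | a :: rest, j => pvPar mg a = j ∧ pvLinksR mg rest a

lemma pvLinksR_par_mem (mg : List Int) :
    ∀ (rp : List Int) (j : Int), pvLinksR mg rp j → ∀ k ∈ rp, pvPar mg k ∈ j :: rp := by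
  intro rp
  induction rp with
  | nil => intro j _ k hk; simp at hk
  | cons a rest ih =>
    rintro j ⟨hpar, hrest⟩ k hk
    rcases List.mem_cons.mp hk with rfl | hk
    · rw [hpar]; exact List.mem_cons_self
    · have := ih a hrest k hk
      rcases List.mem_cons.mp this with h | h
      · subst h; simp
      · simp [List.mem_cons.mpr (Or.inr h)]

lemma pvNodupBound (mg : List Int) (xs : List Int) (h1 : xs.Nodup)
    (h2 : ∀ k ∈ xs, 0 ≤ k ∧ k < (mg.length : Int)) : xs.length ≤ mg.length := by
  have hsub : xs ⊆ PySem.List.pyRange 0 (mg.length : Int) 1 := by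
    intro k hk
    exact (PySem.List.mem_pyRange_one).mpr ⟨(h2 k hk).1, (h2 k hk).2⟩
  have := (h1.subperm hsub).length_le
  rw [PySem.List.length_pyRange_one] at this
  omega

lemma pvGetPar (mg : List Int) {j : Int} (hb : 0 ≤ j ∧ j < (mg.length : Int)) :
    (PySem.List.pyGet? mg j).getD 0 = pvPar mg j := by
  rw [PySem.List.pyGet?_of_nonneg mg hb.1]
  have hlt : j.toNat < mg.length := by omega
  simp [pvPar, List.getD_eq_getElem?_getD, List.getElem?_eq_getElem hlt]

lemma pvWalk_spec (mg : List Int) (total : PySem.Dict Int (Option Int)) :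
    ∀ (f : Nat) (j : Int) (path : List Int),
      path.Nodup →
      (∀ k ∈ path, (0 ≤ k ∧ k < (mg.length : Int)) ∧ total.contains k = false) →
      pvLinksR mg path.reverse j →
      mg.length + 1 ≤ f + path.length →
      ((pvWalkB mg total f j path path).1.Nodup ∧
       (∀ k ∈ (pvWalkB mg total f j path path).1, (0 ≤ k ∧ k < (mg.length : Int)) ∧ total.contains k = false) ∧
       pvLinksR mg (pvWalkB mg total f j path path).1.reverse (pvWalkB mg total f j path path).2 ∧
       (∀ x ∈ path, x ∈ (pvWalkB mg total f j path path).1) ∧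
       (total.contains (pvWalkB mg total f j path path).2 = true ∨
        ¬(0 ≤ (pvWalkB mg total f j path path).2 ∧ (pvWalkB mg total f j path path).2 < (mg.length : Int)) ∨
        (pvWalkB mg total f j path path).2 ∈ (pvWalkB mg total f j path path).1)) := by
  intro f
  induction f with
  | zero =>
    intro j path hnd hprops _ hfuel
    exfalso
    have := pvNodupBound mg path hnd (fun k hk => (hprops k hk).1)
    omega
  | succ f ih =>
    intro j path hnd hprops hlinks hfuel
    by_cases hcond : (!(PySem.Dict.contains total j) && (decide (0 ≤ j) && decide (j < (mg.length : Int))) && !(PySem.Set.contains path j)) = true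
    · -- the loop takes a step
        have hnc : total.contains j = false := by
          simp only [Bool.and_eq_true, Bool.not_eq_true'] at hcond; exact hcond.1.1
        have hb : 0 ≤ j ∧ j < (mg.length : Int) := by
          simp only [Bool.and_eq_true, decide_eq_true_eq] at hcond; exact hcond.1.2
        have hnm : j ∉ path := by
          simp only [Bool.and_eq_true, Bool.not_eq_true'] at hcond
          have := hcond.2
          simpa [PySem.Set.contains] using this
        have hstep : pvWalkB mg total (f + 1) j path path
            = pvWalkB mg total f ((PySem.List.pyGet? mg j).getD 0) (path ++ [j]) (PySem.Set.add path j) := by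
          show (if _ then _ else _) = _
          rw [if_pos hcond]
        have hadd : PySem.Set.add path j = path ++ [j] := by
          unfold PySem.Set.add
          rw [if_neg (by simpa [PySem.Set.contains] using hnm)]
        rw [hstep, hadd, pvGetPar mg hb]
        have hnd' : (path ++ [j]).Nodup := by
          refine List.Nodup.append hnd (by simp) ?_
          intro a ha hb2
          have : a = j := by simpa using hb2
          exact hnm (this ▸ ha)
        have hprops' : ∀ k ∈ path ++ [j], (0 ≤ k ∧ k < (mg.length : Int)) ∧ total.contains k = false := by
          intro k hk
          rcases List.mem_append.mp hk with h | h
          · exact hprops k h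
          · have : k = j := by simpa using h
            subst this; exact ⟨hb, hnc⟩
        have hlinks' : pvLinksR mg (path ++ [j]).reverse (pvPar mg j) := by
          rw [List.reverse_append]
          show pvLinksR mg (j :: path.reverse) (pvPar mg j)
          exact ⟨rfl, hlinks⟩
        have hfuel' : mg.length + 1 ≤ f + (path ++ [j]).length := by
          simp only [List.length_append, List.length_cons, List.length_nil]
          omega
        obtain ⟨c1, c2, c3, c4, c5⟩ := ih (pvPar mg j) (path ++ [j]) hnd' hprops' hlinks' hfuel'
        exact ⟨c1, c2, c3, fun x hx => c4 x (List.mem_append.mpr (Or.inl hx)), c5⟩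
    · -- the loop stops here
        have hstop : pvWalkB mg total (f + 1) j path path = (path, j) := by
          show (if _ then _ else _) = _
          rw [if_neg hcond]
        rw [hstop]
        refine ⟨hnd, hprops, hlinks, fun x hx => hx, ?_⟩
        by_cases h1 : total.contains j = true
        · exact Or.inl h1
        · by_cases h2 : 0 ≤ j ∧ j < (mg.length : Int)
          · refine Or.inr (Or.inr ?_)
            by_contra h3
            apply hcond
            have hc1 : total.contains j = false := by simpa using h1
            simp [hc1, h2.1, h2.2, PySem.Set.contains, h3]
          · exact Or.inr (Or.inl h2)

lemma pvFill_spec (mg it : List Int) :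
    ∀ (rp : List Int) (jp : Int) (ans : Int) (total : PySem.Dict Int (Option Int)),
      rp.Nodup →
      (∀ k ∈ rp, (0 ≤ k ∧ k < (mg.length : Int)) ∧ total.contains k = false) →
      pvLinksR mg rp jp →
      (∀ j v, total.get? j = some v → v = pvT mg it j) →
      ((∀ j v, (rp.foldl (pvFillB it) (pvT mg it jp, ans, total)).2.2.get? j = some v → v = pvT mg it j) ∧
       (rp.foldl (pvFillB it) (pvT mg it jp, ans, total)).2.2.keys = total.keys ++ rp ∧
       (rp.foldl (pvFillB it) (pvT mg it jp, ans, total)).2.1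
         = rp.foldl (fun a k => pvOMax a (pvT mg it k)) ans) := by
  intro rp
  induction rp with
  | nil => intro jp ans total _ _ _ hget; exact ⟨hget, by simp, rfl⟩
  | cons k rest ih =>
    rintro jp ans total hnd hprops ⟨hpar, hlinks⟩ hget
    have hbk := (hprops k List.mem_cons_self).1
    have hck := (hprops k List.mem_cons_self).2
    have hTk : pvT mg it k = (pvT mg it jp).map (· + pvItv it k) := by
      rw [pvT_unfold mg it hbk, hpar]
    have hknotrest : k ∉ rest := (List.nodup_cons.mp hnd).1
    rw [List.foldl_cons, List.foldl_cons]
    cases hx : pvT mg it jp with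
    | some v =>
      have hTk' : pvT mg it k = some (v + pvItv it k) := by rw [hTk, hx]; rfl
      have hbody : pvFillB it (pvT mg it jp, ans, total) k
          = (pvT mg it k, (if v + pvItv it k > ans then v + pvItv it k else ans),
             total.insert k (some (v + pvItv it k))) := by
        rw [hx, hTk']
        rfl
      rw [hx] at hbody
      rw [hbody]
      have hget' : ∀ j w, (total.insert k (some (v + pvItv it k))).get? j = some w → w = pvT mg it j := by
        intro j w hjw
        by_cases hjk : j = k
        · subst hjk
          rw [PySem.Dict.get?_insert_self] at hjw
          rw [hTk']
          exact (Option.some_inj.mp hjw).symm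
        · rw [PySem.Dict.get?_insert_of_ne _ _ hjk] at hjw
          exact hget j w hjw
      have hprops' : ∀ k' ∈ rest, (0 ≤ k' ∧ k' < (mg.length : Int)) ∧
          (total.insert k (some (v + pvItv it k))).contains k' = false := by
        intro k' hk'
        refine ⟨(hprops k' (List.mem_cons_of_mem _ hk')).1, ?_⟩
        rw [PySem.Dict.contains_insert]
        have hne : k' ≠ k := fun h => hknotrest (h ▸ hk')
        simp [hne, (hprops k' (List.mem_cons_of_mem _ hk')).2]
      obtain ⟨c1, c2, c3⟩ := ih k _ _ (List.nodup_cons.mp hnd).2 hprops' hlinks hget'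
      refine ⟨c1, ?_, ?_⟩
      · rw [c2, PySem.Dict.keys_insert_of_not_contains _ _ hck]
        simp
      · rw [c3]
        congr 1
        rw [hTk']
        rfl
    | none =>
      have hTk' : pvT mg it k = none := by rw [hTk, hx]; rfl
      have hbody : pvFillB it (pvT mg it jp, ans, total) k
          = (pvT mg it k, ans, total.insert k none) := by
        rw [hx, hTk']
        rfl
      rw [hx] at hbody
      rw [hbody]
      have hget' : ∀ j w, (total.insert k none).get? j = some w → w = pvT mg it j := by
        intro j w hjw
        by_cases hjk : j = k
        · subst hjk
          rw [PySem.Dict.get?_insert_self] at hjw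
          rw [hTk']
          exact (Option.some_inj.mp hjw).symm
        · rw [PySem.Dict.get?_insert_of_ne _ _ hjk] at hjw
          exact hget j w hjw
      have hprops' : ∀ k' ∈ rest, (0 ≤ k' ∧ k' < (mg.length : Int)) ∧
          (total.insert k none).contains k' = false := by
        intro k' hk'
        refine ⟨(hprops k' (List.mem_cons_of_mem _ hk')).1, ?_⟩
        rw [PySem.Dict.contains_insert]
        have hne : k' ≠ k := fun h => hknotrest (h ▸ hk')
        simp [hne, (hprops k' (List.mem_cons_of_mem _ hk')).2]
      obtain ⟨c1, c2, c3⟩ := ih k _ _ (List.nodup_cons.mp hnd).2 hprops' hlinks hget'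
      refine ⟨c1, ?_, ?_⟩
      · rw [c2, PySem.Dict.keys_insert_of_not_contains _ _ hck]
        simp
      · rw [c3]
        congr 1
        rw [hTk']
        rfl

lemma pvStepB_eq (mg it : List Int) (st : PySem.Dict Int (Option Int) × Int) (i : Int) :
    pvStepB mg it st i
      = (((pvWalkB mg st.1 (mg.length + 1) i [] PySem.Set.empty).1.reverse.foldl (pvFillB it)
            ((st.1.get? (pvWalkB mg st.1 (mg.length + 1) i [] PySem.Set.empty).2).getD none, st.2, st.1)).2.2,
         ((pvWalkB mg st.1 (mg.length + 1) i [] PySem.Set.empty).1.reverse.foldl (pvFillB it)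
            ((st.1.get? (pvWalkB mg st.1 (mg.length + 1) i [] PySem.Set.empty).2).getD none, st.2, st.1)).2.1) := rfl

def pvInv (mg it : List Int) (st : PySem.Dict Int (Option Int) × Int) : Prop :=
  st.1.keys.Nodup ∧ (-1 : Int) ∈ st.1.keys ∧
  (∀ j ∈ st.1.keys, j = -1 ∨ (0 ≤ j ∧ j < (mg.length : Int))) ∧
  (∀ j v, st.1.get? j = some v → v = pvT mg it j) ∧
  st.2 = (st.1.keys.filter (fun j => j != -1)).foldl (fun a k => pvOMax a (pvT mg it k)) 0

lemma pvStep_spec (mg it : List Int) (st : PySem.Dict Int (Option Int) × Int) (i : Int)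
    (hInv : pvInv mg it st) (hi : 0 ≤ i ∧ i < (mg.length : Int)) :
    pvInv mg it (pvStepB mg it st i) ∧
    (∀ x ∈ st.1.keys, x ∈ (pvStepB mg it st i).1.keys) ∧
    i ∈ (pvStepB mg it st i).1.keys := by
  obtain ⟨hknd, hkm1, hkrange, hget, hans⟩ := hInv
  by_cases hci : st.1.contains i = true
  · -- already memoized: the walk stops immediately and the fill does nothing
    have hw : pvWalkB mg st.1 (mg.length + 1) i [] PySem.Set.empty = ([], i) := by
      show (if _ then _ else _) = _
      rw [if_neg (by simp [hci])]
    have hstep : pvStepB mg it st i = (st.1, st.2) := by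
      rw [pvStepB_eq, hw]
      rfl
    rw [hstep]
    exact ⟨⟨hknd, hkm1, hkrange, hget, hans⟩, fun x hx => hx,
      by rwa [← PySem.Dict.contains_iff_mem_keys]⟩
  · -- fresh start node: one unfolding, then the walk lemma from path [i]
    have hci' : st.1.contains i = false := by simpa using hci
    have hw1 : pvWalkB mg st.1 (mg.length + 1) i [] PySem.Set.empty
        = pvWalkB mg st.1 mg.length (pvPar mg i) [i] [i] := by
      show (if _ then _ else _) = _
      rw [if_pos (by simp [hci', hi.1, hi.2, PySem.Set.contains, PySem.Set.empty])]
      rw [pvGetPar mg hi]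
      rfl
    obtain ⟨c1, c2, c3, c4, c5⟩ := pvWalk_spec mg st.1 mg.length (pvPar mg i) [i]
      (by simp)
      (by intro k hk; have : k = i := by simpa using hk
          subst this; exact ⟨hi, hci'⟩)
      (by show pvLinksR mg [i] (pvPar mg i); exact ⟨rfl, trivial⟩)
      (by simp)
    set w := pvWalkB mg st.1 mg.length (pvPar mg i) [i] [i] with hwdef
    have hiw : i ∈ w.1 := c4 i (by simp)
    -- t0 = pvT of the stopping node
    have ht0 : (PySem.Dict.get? st.1 w.2).getD none = pvT mg it w.2 := by
      by_cases hcw : st.1.contains w.2 = true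
      · cases hx : st.1.get? w.2 with
        | none => rw [PySem.Dict.get?_eq_none_iff_contains] at hx; rw [hx] at hcw; simp at hcw
        | some v => rw [hget w.2 v hx]; rfl
      · have hcw' : st.1.contains w.2 = false := by simpa using hcw
        have hnone : st.1.get? w.2 = none := by rwa [PySem.Dict.get?_eq_none_iff_contains]
        rw [hnone]
        have hne1 : w.2 ≠ -1 := by
          intro h
          rw [← PySem.Dict.contains_iff_mem_keys] at hkm1
          rw [h] at hcw'
          rw [hkm1] at hcw'
          simp at hcw'
        rcases c5 with h | h | h
        · rw [h] at hcw'; simp at hcw'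
        · exact (pvT_out mg it hne1 h).symm
        · -- cycle: w.1 is closed under the parent step
          have hclosed : ∀ k ∈ w.1, 0 ≤ k ∧ pvPar mg k ∈ w.1 := by
            intro k hk
            refine ⟨((c2 k hk).1).1, ?_⟩
            have hk' : k ∈ w.1.reverse := by simpa using hk
            have := pvLinksR_par_mem mg w.1.reverse w.2 c3 k hk'
            rcases List.mem_cons.mp this with hh | hh
            · rwa [hh]
            · simpa using hh
          exact (pvT_none_of_closed mg it w.1 hclosed h).symm
    -- apply the fill spec on the reversed path
    have hrevnd : w.1.reverse.Nodup := by simpa using c1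
    have hrevprops : ∀ k ∈ w.1.reverse, (0 ≤ k ∧ k < (mg.length : Int)) ∧ st.1.contains k = false := by
      intro k hk; exact c2 k (by simpa using hk)
    obtain ⟨f1, f2, f3⟩ := pvFill_spec mg it w.1.reverse w.2 st.2 st.1 hrevnd hrevprops c3 hget
    have hstep : pvStepB mg it st i
        = ((w.1.reverse.foldl (pvFillB it) (pvT mg it w.2, st.2, st.1)).2.2,
           (w.1.reverse.foldl (pvFillB it) (pvT mg it w.2, st.2, st.1)).2.1) := by
      rw [pvStepB_eq, hw1, ht0]
    rw [hstep]
    have hfresh : ∀ k ∈ w.1.reverse, k ∉ st.1.keys := by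
      intro k hk hmem
      rw [← PySem.Dict.contains_iff_mem_keys] at hmem
      rw [(hrevprops k hk).2] at hmem
      exact absurd hmem (by simp)
    refine ⟨⟨?_, ?_, ?_, f1, ?_⟩, ?_, ?_⟩
    · -- keys nodup
      rw [f2]
      exact List.Nodup.append hknd hrevnd (fun a ha hb => hfresh a hb ha)
    · rw [f2]; exact List.mem_append.mpr (Or.inl hkm1)
    · rw [f2]
      intro j hj
      rcases List.mem_append.mp hj with h | h
      · exact hkrange j h
      · exact Or.inr (hrevprops j h).1
    · -- the running max
      rw [f3, f2, hans, List.filter_append]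
      have : w.1.reverse.filter (fun j => j != -1) = w.1.reverse := by
        apply List.filter_eq_self.mpr
        intro a ha
        have := (hrevprops a ha).1.1
        simp only [bne_iff_ne, ne_eq]
        omega
      rw [this, List.foldl_append]
    · rw [f2]; intro x hx; exact List.mem_append.mpr (Or.inl hx)
    · rw [f2]
      exact List.mem_append.mpr (Or.inr (by simpa using hiw))

lemma pvOuter (mg it : List Int) :
    ∀ (idx : List Int) (st : PySem.Dict Int (Option Int) × Int),
      pvInv mg it st → (∀ i ∈ idx, 0 ≤ i ∧ i < (mg.length : Int)) →
      (pvInv mg it (idx.foldl (pvStepB mg it) st) ∧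
       (∀ x ∈ st.1.keys, x ∈ (idx.foldl (pvStepB mg it) st).1.keys) ∧
       (∀ i ∈ idx, i ∈ (idx.foldl (pvStepB mg it) st).1.keys)) := by
  intro idx
  induction idx with
  | nil => intro st hInv _; exact ⟨hInv, fun x hx => hx, by simp⟩
  | cons i rest ih =>
    intro st hInv hidx
    obtain ⟨h1, h2, h3⟩ := pvStep_spec mg it st i hInv (hidx i List.mem_cons_self)
    obtain ⟨g1, g2, g3⟩ := ih (pvStepB mg it st i) h1 (fun i' hi' => hidx i' (List.mem_cons_of_mem _ hi'))
    rw [List.foldl_cons]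
    refine ⟨g1, fun x hx => g2 x (h2 x hx), ?_⟩
    intro i' hi'
    rcases List.mem_cons.mp hi' with rfl | hh
    · exact g2 i' h3
    · exact g3 i' hh

-- ===================================================================
-- ---- assembling both sides ----
-- ===================================================================

lemma pvB_eq (mg it : List Int) (n headID : Int) :
    numOfMinutes_bfs_2964ms_alt n headID mg it
      = ((List.range mg.length).filterMap (fun (k : Nat) => pvT mg it (k : Int))).foldl max 0 := by
  unfold numOfMinutes_bfs_2964ms_alt
  have hInv0 : pvInv mg it (PySem.Dict.empty.insert (-1) (some 0), 0) := by
    refine ⟨?_, ?_, ?_, ?_, ?_⟩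
    · show ((PySem.Dict.empty.insert (-1 : Int) (some (0:Int))).keys).Nodup
      decide
    · decide
    · intro j hj
      have : j = -1 := by
        have : (PySem.Dict.empty.insert (-1 : Int) (some (0:Int))).keys = [-1] := by decide
        rw [this] at hj
        simpa using hj
      exact Or.inl this
    · intro j v hjv
      by_cases hj : j = -1
      · subst hj
        rw [PySem.Dict.get?_insert_self] at hjv
        rw [pvT_neg_one]
        exact (Option.some_inj.mp hjv).symm
      · rw [PySem.Dict.get?_insert_of_ne _ _ hj] at hjv
        rw [PySem.Dict.get?_empty] at hjv
        exact absurd hjv (by simp)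
    · show (0 : Int) = _
      have : (PySem.Dict.empty.insert (-1 : Int) (some (0:Int))).keys = [-1] := by decide
      rw [this]
      rfl
  have hidx : ∀ i ∈ PySem.List.pyRange 0 (mg.length : Int) 1, 0 ≤ i ∧ i < (mg.length : Int) := by
    intro i hi
    exact (PySem.List.mem_pyRange_one).mp hi
  obtain ⟨⟨hknd, hkm1, hkrange, hget, hans⟩, -, hall⟩ :=
    pvOuter mg it (PySem.List.pyRange 0 (mg.length : Int) 1) (PySem.Dict.empty.insert (-1) (some 0), 0) hInv0 hidx
  set stf := (PySem.List.pyRange 0 (mg.length : Int) 1).foldl (pvStepB mg it)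
      (PySem.Dict.empty.insert (-1) (some 0), 0) with hstf
  rw [hans]
  -- the filtered key list is a permutation of range(L)
  have hKnd : (stf.1.keys.filter (fun j => j != -1)).Nodup := hknd.filter _
  have hRnd : (PySem.List.pyRange 0 (mg.length : Int) 1).Nodup := PySem.List.nodup_pyRange_one _ _
  have hmemiff : ∀ a, a ∈ stf.1.keys.filter (fun j => j != -1) ↔ a ∈ PySem.List.pyRange 0 (mg.length : Int) 1 := by
    intro a
    rw [List.mem_filter, PySem.List.mem_pyRange_one]
    constructor
    · rintro ⟨hmem, hne⟩
      rcases hkrange a hmem with h | h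
      · simp [h] at hne
      · exact h
    · intro h
      refine ⟨hall a ((PySem.List.mem_pyRange_one).mpr h), ?_⟩
      simp only [bne_iff_ne, ne_eq]
      omega
  have hperm : (stf.1.keys.filter (fun j => j != -1)).Perm (PySem.List.pyRange 0 (mg.length : Int) 1) :=
    (List.perm_ext_iff_of_nodup hKnd hRnd).mpr hmemiff
  rw [hperm.foldl_eq' (fun x _ y _ z => pvOMax_comm z (pvT mg it x) (pvT mg it y)) 0]
  have hrange : PySem.List.pyRange 0 (mg.length : Int) 1 = (List.range mg.length).map (fun (k : Nat) => (k : Int)) := by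
    rw [PySem.List.pyRange_one]
    have h1 : ((mg.length : Int) - 0).toNat = mg.length := by omega
    rw [h1]
    apply List.map_congr_left
    intro k _
    omega
  rw [hrange, List.foldl_map]
  exact pvFoldl_pvOMax_filterMap (fun (k : Nat) => pvT mg it (k : Int)) (List.range mg.length) 0

lemma pvDd_succ_bounds (mg it : List Int) {d : Nat} {i t : Int}
    (h : pvDd mg it (d + 1) i = some t) : 0 ≤ i ∧ i < (mg.length : Int) := by
  by_contra hb
  simp [pvDd, hb] at h

lemma pvA_eq (mg it : List Int) (n headID : Int) :
    numOfMinutes_bfs_2964ms n headID mg it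
      = ((List.range mg.length).filterMap (fun (k : Nat) => pvT mg it (k : Int))).foldl max 0 := by
  unfold numOfMinutes_bfs_2964ms
  rw [show [((-1 : Int), (0 : Int))] = pvFr0 from rfl]
  rw [pvLoopA_runs it mg (mg.length + 1) pvFr0 0 0 (mg.length + 1)
      (pvSizes_le it mg (mg.length + 1)) (pvIter_fr0_empty it mg)]
  rw [pvRun_eq]
  -- the pair list of all levels ≥ 1
  set VA := pvGUP it (pvEmpMap mg) (mg.length + 1) (pvNext it (pvEmpMap mg) pvFr0) with hVA
  set PB := (List.range mg.length).filterMap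
      (fun (k : Nat) => (pvT mg it (k : Int)).map (fun t => ((k : Int), t))) with hPB
  -- VA is nodup (its fst list is a suffix of the globally-nodup pvGU list)
  have hVAnd : VA.Nodup := by
    have hfst : VA.map Prod.fst = pvGU it (pvEmpMap mg) (mg.length + 1) (pvNext it (pvEmpMap mg) pvFr0) := by
      rw [pvGU_eq_map_fst]
    have hsplit : pvGU it (pvEmpMap mg) (mg.length + 2) pvFr0
        = pvFr0.map Prod.fst ++ pvGU it (pvEmpMap mg) (mg.length + 1) (pvNext it (pvEmpMap mg) pvFr0) := rfl
    have := pvGU_nodup it mg (mg.length + 2)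
    rw [hsplit] at this
    have hnd := this.of_append_right
    rw [← hfst] at hnd
    exact hnd.of_map
  have hPBnd : PB.Nodup := by
    rw [hPB]
    apply List.Nodup.filterMap ?_ (List.nodup_range)
    intro a a' b hb hb'
    cases ha : pvT mg it (a : Int) with
    | none => rw [ha] at hb; simp at hb
    | some t =>
      cases ha' : pvT mg it (a' : Int) with
      | none => rw [ha'] at hb'; simp at hb'
      | some t' =>
        rw [ha] at hb; rw [ha'] at hb'
        simp only [Option.map_some, Option.mem_def, Option.some_inj] at hb hb'
        have heq2 : ((a : Int), t) = ((a' : Int), t') := by rw [hb, ← hb']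
        have h3 : (a : Int) = (a' : Int) := congrArg Prod.fst heq2
        exact_mod_cast h3
  have hmem : ∀ p : Int × Int, p ∈ VA ↔ p ∈ PB := by
    intro p
    rw [hVA, pvMem_GUP, hPB, List.mem_filterMap]
    constructor
    · rintro ⟨a, ha, hmem⟩
      have hmem' : p ∈ pvIter it (pvEmpMap mg) (a + 1) pvFr0 := by
        rw [pvIter, Function.iterate_succ_apply]
        exact hmem
      have hD : pvDd mg it (a + 1) p.1 = some p.2 :=
        (pvMem_iter mg it (a + 1) p.1 p.2).mp (by rwa [show (p.1, p.2) = p from rfl])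
      have hb := pvDd_succ_bounds mg it hD
      refine ⟨p.1.toNat, List.mem_range.mpr (by omega), ?_⟩
      have hT : pvT mg it p.1 = some p.2 := (pvT_iff mg it p.1 p.2).mpr ⟨a + 1, hD⟩
      rw [show ((p.1.toNat : Nat) : Int) = p.1 by omega, hT]
      simp
    · rintro ⟨k, hk, hmap⟩
      cases ha : pvT mg it (k : Int) with
      | none => rw [ha] at hmap; simp at hmap
      | some t =>
        rw [ha] at hmap
        simp only [Option.map_some, Option.some_inj] at hmap
        obtain ⟨d, hD⟩ := (pvT_iff mg it (k : Int) t).mp ha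
        cases d with
        | zero =>
          exfalso
          have : (k : Int) = -1 := by by_contra hc; simp [pvDd, hc] at hD
          omega
        | succ d =>
          refine ⟨d, ?_, ?_⟩
          · have := pvDd_le mg it hD; omega
          · rw [← hmap]
            have : ((k : Int), t) ∈ pvIter it (pvEmpMap mg) (d + 1) pvFr0 :=
              (pvMem_iter mg it (d + 1) (k : Int) t).mpr hD
            rw [pvIter, Function.iterate_succ_apply] at this
            exact this
  have hperm : VA.Perm PB := (List.perm_ext_iff_of_nodup hVAnd hPBnd).mpr hmem
  have hpermsnd : (VA.map Prod.snd).Perm (PB.map Prod.snd) := hperm.map Prod.snd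
  rw [hpermsnd.foldl_eq' (fun x _ y _ z => by rw [max_right_comm]) 0]
  congr 1
  rw [hPB, List.map_filterMap]
  apply List.filterMap_congr
  intro k _
  cases hx : pvT mg it (k : Int) with
  | none => simp
  | some t => simp

-- ===== VERDICT (by name: the statement is the Claim_ definition above) =====
theorem numOfMinutes_bfs_2964ms_spec : Claim_equal_numOfMinutes_bfs_2964ms := by
  intro n headID mg it _ _
  unfold Spec_numOfMinutes_bfs_2964ms
  rw [pvA_eq mg it n headID, pvB_eq mg it n headID]
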